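-- pv_equiv track=rewrite | github.com/tamohannes/ncluster | sdk/session.py | _dedupe_args
-- ===== SOURCE A (Python) =====
-- def _dedupe_args(args: list[str]) -> list[str]:
--     out = []
--     seen = set()
--     for arg in args:
--         marker = (len(out), arg) if arg.startswith("-") and "=" not in arg else arg
--         if marker in seen:
--             continue
--         seen.add(marker)
--         out.append(arg)
--     return out
-- ===== SOURCE B (Python) =====
-- def _dedupe_args(args: list[str]) -> list[str]:
--     # Two staged passes, no incremental seen-set interleaved with output:
--     # pass 1 records each string's first-occurrence index; pass 2 is a
--     # stateless filter keeping flag-like args (which are never deduplicated)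
--     # and every arg standing at its own first occurrence.
--     first = {}
--     for i, arg in enumerate(args):
--         if arg not in first:
--             first[arg] = i
--     return [arg for i, arg in enumerate(args)
--             if (arg.startswith("-") and "=" not in arg) or first[arg] == i]
-- ===== Notes on version B (the rewrite author's own statement) =====
-- stated objective: alternative
-- what changed: Replaces A's single-pass set-with-marker dedup by two staged passes: a first pass builds a map from each string to its first-occurrence index, then a stateless comprehension keeps flag-like args (which A's position-tagged marker never deduplicates) and every arg standing at its first occurrence; no seen-set state is threaded through the output pass.
import Mathlib
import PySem

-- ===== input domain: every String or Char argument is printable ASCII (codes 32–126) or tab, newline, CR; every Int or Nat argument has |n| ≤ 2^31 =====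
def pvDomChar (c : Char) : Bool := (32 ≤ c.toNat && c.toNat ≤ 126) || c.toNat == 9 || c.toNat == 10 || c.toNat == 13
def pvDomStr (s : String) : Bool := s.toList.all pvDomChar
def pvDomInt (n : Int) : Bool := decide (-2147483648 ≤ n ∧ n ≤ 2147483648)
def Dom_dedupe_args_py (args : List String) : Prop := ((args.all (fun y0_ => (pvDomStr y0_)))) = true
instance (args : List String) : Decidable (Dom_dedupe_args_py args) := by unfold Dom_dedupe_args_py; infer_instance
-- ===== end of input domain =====

-- B replaces A's single-pass marker-set dedup by two staged passes: a first-occurrence-index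
-- map, then a stateless filter keeping flags and first occurrences (alternative decomposition).

-- the flag test 'arg.startswith("-") and "=" not in arg', shared verbatim by both Pythons
def pvFlag (a : String) : Bool := PySem.Str.startswith a "-" && !(PySem.Str.isIn "=" a)

-- ===== PORT A =====
-- A's loop; Python's mixed-type 'seen' set holds tuple markers (len(out), arg) for
-- flag-like args and plain strings otherwise, modelled by the sum type (Nat × String) ⊕ String.
def dedupeLoopA : List String → List String → PySem.Set ((Nat × String) ⊕ String) → List String
  | [], out, _ => out
  | arg :: rest, out, seen =>
    let marker : (Nat × String) ⊕ String :=
      if pvFlag arg then Sum.inl (out.length, arg) else Sum.inr arg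
    if PySem.Set.contains seen marker then
      dedupeLoopA rest out seen
    else
      dedupeLoopA rest (out ++ [arg]) (PySem.Set.add seen marker)

def dedupe_args_py (args : List String) : List String :=
  dedupeLoopA args [] PySem.Set.empty

-- ===== PORT B =====
-- pass 1 of Source B: first = {}; for i, arg in enumerate(args): if arg not in first: first[arg] = i
def firstIdxDict (args : List String) : PySem.Dict String Int :=
  (PySem.List.enumerate args 0).foldl
    (fun d p => if d.contains p.2 then d else d.insert p.2 p.1) PySem.Dict.empty

-- pass 2 of Source B, the comprehension; 'first[arg] == i' never raises (every arg is a key),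
-- so it is ported as 'get? arg == some i'.
def dedupe_args_py_alt (args : List String) : List String :=
  let first := firstIdxDict args
  ((PySem.List.enumerate args 0).filter
    (fun p => pvFlag p.2 || (first.get? p.2 == some p.1))).map (·.2)

-- ===== PRECONDITION & SPEC =====
def Spec_dedupe_args_py (args : List String) (out : List String) : Prop := out = dedupe_args_py_alt args
instance (args : List String) (out : List String) : Decidable (Spec_dedupe_args_py args out) := by unfold Spec_dedupe_args_py; infer_instance

-- ===== CLAIM (what is proved, stated in full; the proofs are below) =====
def Claim_equal_dedupe_args_py : Prop := ∀ (args : List String), Dom_dedupe_args_py args → Spec_dedupe_args_py args (dedupe_args_py args)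

-- ===== LEMMAS AND PROOFS =====

-- reference shape both ports are reduced to: keep a if it is a flag or not in the processed prefix
def pvSpecLoop : List String → List String → List String
  | [], _ => []
  | a :: rest, pre =>
    if pvFlag a || !(pre.contains a) then a :: pvSpecLoop rest (pre ++ [a])
    else pvSpecLoop rest (pre ++ [a])

-- Lean core has no LawfulBEq instance for Sum; proved here as a plain theorem.
theorem lbeqSum : LawfulBEq ((Nat × String) ⊕ String) := by
  refine { rfl := ?_, eq_of_beq := ?_ }
  · intro a
    cases a <;> simp [(· == ·), Sum.instBEq.beq]
  · intro a b h
    cases a <;> cases b <;> simp_all [(· == ·), Sum.instBEq.beq, Prod.ext_iff]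

theorem containsA_iff (s : PySem.Set ((Nat × String) ⊕ String)) (x : (Nat × String) ⊕ String) :
    PySem.Set.contains s x = true ↔ x ∈ s :=
  @PySem.Set.contains_iff _ _ lbeqSum s x

theorem set_add_eq_append {α : Type} [BEq α] (s : PySem.Set α) (x : α)
    (h : PySem.Set.contains s x = false) : PySem.Set.add s x = s ++ [x] := by
  simp only [PySem.Set.add, h, Bool.false_eq_true, if_false]

-- A's loop produces pvSpecLoop: the string markers in 'seen' are exactly the non-flag
-- strings of the processed prefix, and tuple markers never collide with the fresh one.
theorem loopA_eq_spec (suffix : List String) :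
    ∀ (pre out : List String) (seen : PySem.Set ((Nat × String) ⊕ String)),
      (∀ s : String, Sum.inr s ∈ seen ↔ (pvFlag s = false ∧ s ∈ pre)) →
      (∀ p : Nat × String, Sum.inl p ∈ seen → p.1 < out.length) →
      dedupeLoopA suffix out seen = out ++ pvSpecLoop suffix pre := by
  induction suffix with
  | nil => intro pre out seen _ _; simp [dedupeLoopA, pvSpecLoop]
  | cons a rest ih =>
    intro pre out seen hstr htup
    simp only [dedupeLoopA, pvSpecLoop]
    by_cases hf : pvFlag a = true
    · -- flag: marker is the fresh tuple, never seen; both keep a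
      have hnotin : Sum.inl (out.length, a) ∉ seen := fun hmem =>
        absurd (htup _ hmem) (lt_irrefl _)
      have hc : PySem.Set.contains seen (Sum.inl (out.length, a)) = false := by
        rw [← Bool.not_eq_true, containsA_iff]; exact hnotin
      simp only [hf, if_true, Bool.true_or, hc, Bool.false_eq_true, if_false,
        set_add_eq_append _ _ hc]
      rw [ih (pre ++ [a]) (out ++ [a]) _ ?_ ?_]
      · simp
      · intro s
        simp only [List.mem_append, List.mem_singleton, hstr s]
        constructor
        · rintro (h | h)
          · exact ⟨h.1, Or.inl h.2⟩
          · cases h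
        · rintro ⟨hfs, h | h⟩
          · exact Or.inl ⟨hfs, h⟩
          · subst h; rw [hf] at hfs; cases hfs
      · intro p hp
        simp only [List.mem_append, List.mem_singleton] at hp
        simp only [List.length_append, List.length_singleton]
        rcases hp with h | h
        · exact Nat.lt_succ_of_lt (htup p h)
        · rw [Sum.inl.injEq] at h; subst h; simp
    · -- plain string: 'marker in seen' is membership of a in the prefix
      simp only [Bool.not_eq_true] at hf
      have hcs : PySem.Set.contains seen (Sum.inr a) = pre.contains a := by
        cases hb : pre.contains a with
        | true =>
          rw [containsA_iff, hstr a]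
          exact ⟨hf, by simpa using hb⟩
        | false =>
          rw [← Bool.not_eq_true, containsA_iff, hstr a]
          rintro ⟨-, hmem⟩
          simp [List.contains_eq_mem, hmem] at hb
      simp only [hf, Bool.false_eq_true, if_false, hcs, Bool.false_or]
      cases hb : pre.contains a with
      | true =>
        simp only [if_true, Bool.not_true, Bool.false_eq_true, if_false]
        apply ih (pre ++ [a]) out seen ?_ htup
        intro s
        rw [hstr s]
        simp only [List.mem_append, List.mem_singleton]
        constructor
        · rintro ⟨hfs, h⟩; exact ⟨hfs, Or.inl h⟩
        · rintro ⟨hfs, h | h⟩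
          · exact ⟨hfs, h⟩
          · subst h; exact ⟨hfs, by simpa [List.contains_eq_mem] using hb⟩
      | false =>
        have hcsf : PySem.Set.contains seen (Sum.inr a) = false := hcs.trans hb
        simp only [Bool.false_eq_true, if_false, Bool.not_false, if_true,
          set_add_eq_append _ _ hcsf]
        rw [ih (pre ++ [a]) (out ++ [a]) _ ?_ ?_]
        · simp
        · intro s
          simp only [List.mem_append, List.mem_singleton, hstr s]
          constructor
          · rintro (h | h)
            · exact ⟨h.1, Or.inl h.2⟩
            · rw [Sum.inr.injEq] at h; subst h; exact ⟨hf, Or.inr rfl⟩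
          · rintro ⟨hfs, h | h⟩
            · exact Or.inl ⟨hfs, h⟩
            · subst h; exact Or.inr rfl
        · intro p hp
          simp only [List.mem_append, List.mem_singleton] at hp
          simp only [List.length_append, List.length_singleton]
          rcases hp with h | h
          · exact Nat.lt_succ_of_lt (htup p h)
          · cases h

-- the dict pass: lookup in the folded dict is the first matching index in the pair list
theorem firstFold_get? (l : List (Int × String)) :
    ∀ (d : PySem.Dict String Int) (a : String),
      ((l.foldl (fun d p => if d.contains p.2 then d else d.insert p.2 p.1) d).get? a)
        = (d.get? a).or ((l.find? (fun p => p.2 == a)).map (·.1)) := by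
  induction l with
  | nil => intro d a; simp
  | cons p rest ih =>
    intro d a
    simp only [List.foldl_cons, List.find?_cons]
    by_cases hc : d.contains p.2 = true
    · by_cases he : p.2 = a
      · subst he
        have : (d.get? p.2).isSome := by
          rw [← PySem.Dict.contains_eq_isSome_get?]; exact hc
        simp only [hc, if_true, ih d p.2, BEq.rfl]
        rcases Option.isSome_iff_exists.mp this with ⟨v, hv⟩
        simp [hv]
      · have hb : (p.2 == a) = false := by simp [he]
        simp [hc, ih d a, hb]
    · simp only [Bool.not_eq_true] at hc
      by_cases he : p.2 = a
      · subst he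
        have hn : d.get? p.2 = none := by
          rw [PySem.Dict.get?_eq_none_iff_contains, hc]
        simp [hc, ih, PySem.Dict.get?_insert_self, hn]
      · have hb : (p.2 == a) = false := by simp [he]
        have hi : (d.insert p.2 p.1).get? a = d.get? a := by
          rw [PySem.Dict.get?_insert]
          exact if_neg (fun h => he h.symm)
        simp [hc, ih, hi, hb]

-- first-occurrence search over enumerate ↔ membership in the prefix before k
theorem findEnum_iff (args : List String) :
    ∀ (s : Int) (a : String) (k : Nat) (hk : k < args.length), args[k] = a →
      ((((PySem.List.enumerate args s).find? (fun p => p.2 == a)).map (·.1) = some (s + k))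
        ↔ a ∉ args.take k) := by
  induction args with
  | nil => intro _ _ k hk; exact absurd hk (by simp)
  | cons x rest ih =>
    intro s a k hk hget
    rw [PySem.List.enumerate_cons, List.find?_cons]
    by_cases hx : x = a
    · subst hx
      simp only [BEq.rfl, Option.map_some]
      cases k with
      | zero => simp
      | succ j =>
        constructor
        · intro h
          rw [Option.some.injEq] at h
          omega
        · intro h
          exfalso; exact h (by simp [List.take_succ_cons])
    · have hbx : (x == a) = false := by simp [hx]
      cases k with
      | zero => simp at hget; exact absurd hget hx
      | succ j =>
        simp only [hbx, List.take_succ_cons, List.mem_cons]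
        have hj : j < rest.length := by simpa using hk
        have hgj : rest[j] = a := by simpa using hget
        have hih := ih (s + 1) a j hj hgj
        have hcast : s + (((j + 1 : Nat)) : Int) = (s + 1) + (j : Nat) := by push_cast; ring
        rw [hcast, hih]
        constructor
        · intro h hmem
          rcases hmem with h' | h'
          · exact hx h'.symm
          · exact h h'
        · intro h hmem
          exact h (Or.inr hmem)

-- B's filter over enumerate, rewritten to the take-prefix condition, is pvSpecLoop
theorem filterEnum_eq_spec (args : List String) (suffix : List String) :
    ∀ (pre : List String), args = pre ++ suffix →
      ((PySem.List.enumerate suffix (pre.length : Int)).filter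
        (fun p => pvFlag p.2 || !((args.take p.1.toNat).contains p.2))).map (·.2)
        = pvSpecLoop suffix pre := by
  induction suffix with
  | nil => intro pre _; simp [pvSpecLoop]
  | cons a rest ih =>
    intro pre heq
    rw [PySem.List.enumerate_cons, List.filter_cons]
    have htake : args.take ((pre.length : Int)).toNat = pre := by
      simp [heq]
    simp only [htake, pvSpecLoop]
    have hnext : ((pre.length : Int) + 1) = (((pre ++ [a]).length : Nat) : Int) := by
      simp
    have hrest := ih (pre ++ [a]) (by simp [heq])
    rw [hnext]
    by_cases hcond : (pvFlag a || !(pre.contains a)) = true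
    · simp only [hcond, if_true, List.map_cons, hrest]
    · simp only [Bool.not_eq_true] at hcond
      simp only [hcond, Bool.false_eq_true, if_false, hrest]

-- B's real filter condition agrees pointwise on the enumerate members
theorem altFilter_congr (args : List String) :
    ((PySem.List.enumerate args 0).filter
      (fun p => pvFlag p.2 || ((firstIdxDict args).get? p.2 == some p.1)))
    = ((PySem.List.enumerate args 0).filter
      (fun p => pvFlag p.2 || !((args.take p.1.toNat).contains p.2))) := by
  apply List.filter_congr
  intro p hp
  rcases (PySem.List.mem_enumerate_iff _ _ _).mp hp with ⟨k, hk, hpk⟩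
  subst hpk
  have hget : ((firstIdxDict args).get? args[k])
      = (((PySem.List.enumerate args 0).find? (fun q => q.2 == args[k])).map (·.1)) := by
    rw [firstIdxDict, firstFold_get? _ PySem.Dict.empty]
    simp
  have hiff := findEnum_iff args 0 args[k] k hk rfl
  congr 1
  rw [hget]
  have htn : ((0 + (k : Nat) : Int)).toNat = k := by omega
  rw [htn]
  cases hmem : (args.take k).contains args[k] with
  | true =>
    have : args[k] ∈ args.take k := by simpa [List.contains_eq_mem] using hmem
    have hne : (((PySem.List.enumerate args 0).find? (fun q => q.2 == args[k])).map (·.1))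
        ≠ some ((0 : Int) + (k : Nat)) := fun h => (hiff.mp h) this
    simp only [Bool.not_true]
    cases hv : (((PySem.List.enumerate args 0).find? (fun q => q.2 == args[k])).map (·.1)) with
    | none => simp
    | some v =>
      rw [hv] at hne
      have : v ≠ (0 : Int) + (k : Nat) := fun h => hne (by rw [h])
      simp only [beq_eq_false_iff_ne, ne_eq, Option.some.injEq]
      omega
  | false =>
    have hnm : args[k] ∉ args.take k := by
      intro h; simp [List.contains_eq_mem, h] at hmem
    rw [hiff.mpr hnm]
    simp

-- ===== VERDICT (by name: the statement is the Claim_ definition above) =====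
theorem dedupe_args_py_spec : Claim_equal_dedupe_args_py := by
  intro args _
  unfold Spec_dedupe_args_py dedupe_args_py dedupe_args_py_alt
  rw [loopA_eq_spec args [] [] PySem.Set.empty
    (by intro s; simp [PySem.Set.empty]) (by intro p hp; simp [PySem.Set.empty] at hp)]
  simp only [List.nil_append]
  rw [altFilter_congr args,
    filterEnum_eq_spec args args [] (by simp) |>.symm]
  rfl
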